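-- pv_equiv track=rewrite | github.com/beyildirim/weaklink-labs | weaklink_platform/labs.py | phase_entries
-- ===== SOURCE A (Python) =====
-- PHASE_LABELS = {
--     "phase_understand": ("UNDERSTAND", 1),
--     "phase_break": ("BREAK", 2),
--     "phase_defend": ("DEFEND", 3),
--     "phase_detect": ("DETECT", 4),
--     "phase_investigate": ("INVESTIGATE", 2),
--     "phase_respond": ("RESPOND", 4),
-- }
--
-- def phase_entries(metadata: dict[str, object]) -> list[tuple[int, str, str]]:
--     phases: list[tuple[int, str, str]] = []
--     for key, value in metadata.items():
--         if key not in PHASE_LABELS or not value: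
--             continue
--         label, order = PHASE_LABELS[key]
--         phases.append((order, label, str(value)))
--     return sorted(phases, key=lambda item: (item[0], item[1]))
-- ===== SOURCE B (Python) =====
-- # B: iterate a precomputed (order, label, key) list already in (order, label) order
-- # and look each key up in the metadata dict; no sort call needed.
-- PHASES_ORDERED = [
--     (1, "UNDERSTAND", "phase_understand"),
--     (2, "BREAK", "phase_break"),
--     (2, "INVESTIGATE", "phase_investigate"),
--     (3, "DEFEND", "phase_defend"),
--     (4, "DETECT", "phase_detect"),
--     (4, "RESPOND", "phase_respond"),
-- ]
--
-- def phase_entries(metadata: dict[str, object]) -> list[tuple[int, str, str]]: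
--     out: list[tuple[int, str, str]] = []
--     for order, label, key in PHASES_ORDERED:
--         value = metadata.get(key, "")
--         if value:
--             out.append((order, label, str(value)))
--     return out
-- ===== Notes on version B (the rewrite author's own statement) =====
-- stated objective: simpler
-- what changed: B inverts the loop driver: instead of scanning metadata items, filtering against PHASE_LABELS and then sorting by (order, label), it walks a precomputed list of the six phases already in (order, label) order and looks each key up in metadata, so the sort disappears.
import Mathlib
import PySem

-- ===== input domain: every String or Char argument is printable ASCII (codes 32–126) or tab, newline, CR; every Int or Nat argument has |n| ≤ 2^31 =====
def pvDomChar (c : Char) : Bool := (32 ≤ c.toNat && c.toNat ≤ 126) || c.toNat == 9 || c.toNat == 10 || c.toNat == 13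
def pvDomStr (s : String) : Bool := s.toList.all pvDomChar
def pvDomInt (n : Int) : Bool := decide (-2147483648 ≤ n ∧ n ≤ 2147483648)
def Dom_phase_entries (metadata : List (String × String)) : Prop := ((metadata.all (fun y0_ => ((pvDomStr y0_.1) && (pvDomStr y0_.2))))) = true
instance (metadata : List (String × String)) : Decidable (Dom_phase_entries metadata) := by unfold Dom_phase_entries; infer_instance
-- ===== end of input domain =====

-- B changes the decomposition: it walks a fixed (order, label)-ordered phase list and looks keys up
-- in the metadata dict, instead of scanning metadata and sorting; same return value (simpler, no sort).
-- The dict argument is marshalled from the association list with PySem.Dict.ofList in both ports.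

-- ===== PORT A =====
def PHASE_LABELS : PySem.Dict String (String × Int) :=
  PySem.Dict.ofList [
    ("phase_understand", ("UNDERSTAND", 1)),
    ("phase_break", ("BREAK", 2)),
    ("phase_defend", ("DEFEND", 3)),
    ("phase_detect", ("DETECT", 4)),
    ("phase_investigate", ("INVESTIGATE", 2)),
    ("phase_respond", ("RESPOND", 4))]

def phase_entries (metadata : List (String × String)) : List (Int × String × String) :=
  -- (PySem.Dict.ofList metadata) is the Python dict argument
  PySem.List.sorted2
    ((PySem.Dict.ofList metadata).items.foldl (fun acc kv =>
      if !(PHASE_LABELS.contains kv.1) || kv.2 == "" then acc   -- 'not value' on a str value is == ""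
      else
        match PHASE_LABELS.get? kv.1 with                       -- label, order = PHASE_LABELS[key]
        | some lo => acc ++ [(lo.2, lo.1, kv.2)]                -- str(value) on a str is the identity
        | none => acc) [])
    (fun it => it.1) (fun it => it.2.1) false

-- ===== PORT B =====
def PHASES_ORDERED : List (Int × String × String) := [
  (1, "UNDERSTAND", "phase_understand"),
  (2, "BREAK", "phase_break"),
  (2, "INVESTIGATE", "phase_investigate"),
  (3, "DEFEND", "phase_defend"),
  (4, "DETECT", "phase_detect"),
  (4, "RESPOND", "phase_respond")]

def phase_entries_alt (metadata : List (String × String)) : List (Int × String × String) :=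
  -- (PySem.Dict.ofList metadata) is the Python dict argument
  PHASES_ORDERED.foldl (fun acc olk =>
    let value := (PySem.Dict.ofList metadata).getD olk.2.2 ""   -- metadata.get(key, "")
    if value ≠ "" then acc ++ [(olk.1, olk.2.1, value)] else acc) []

-- ===== PRECONDITION & SPEC =====
def Spec_phase_entries (metadata : List (String × String)) (out : List (Int × String × String)) : Prop := out = phase_entries_alt metadata
instance (metadata : List (String × String)) (out : List (Int × String × String)) : Decidable (Spec_phase_entries metadata out) := by unfold Spec_phase_entries; infer_instance

-- ===== CLAIM (what is proved, stated in full; the proofs are below) =====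
def Claim_equal_phase_entries : Prop := ∀ (metadata : List (String × String)), Dom_phase_entries metadata → Spec_phase_entries metadata (phase_entries metadata)

-- ===== LEMMAS AND PROOFS =====

-- the common per-key entry builder both sides' outputs are images of
def pvEntry (d : PySem.Dict String String) (k : String) : Int × String × String :=
  match PHASE_LABELS.get? k with
  | some lo => (lo.2, lo.1, d.getD k "")
  | none => (0, "", "")

-- the lexicographic sort key of an entry
def pvKey (it : Int × String × String) : Lex (Int × String) := toLex (it.1, it.2.1)

-- A's loop builds the filtered-and-mapped items list
lemma A_fold_eq (d : PySem.Dict String String) :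
    d.items.foldl (fun acc kv =>
      if !(PHASE_LABELS.contains kv.1) || kv.2 == "" then acc
      else
        match PHASE_LABELS.get? kv.1 with
        | some lo => acc ++ [(lo.2, lo.1, kv.2)]
        | none => acc) [] =
    (d.items.filter (fun kv => (PHASE_LABELS.get? kv.1).isSome && kv.2 != "")).map
      (fun kv => (((PHASE_LABELS.get? kv.1).getD ("", 0)).2, ((PHASE_LABELS.get? kv.1).getD ("", 0)).1, kv.2)) := by
  rw [PySem.List.foldl_congr_mem (g := fun acc kv =>
    if ((PHASE_LABELS.get? kv.1).isSome && kv.2 != "") = true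
    then acc ++ [(((PHASE_LABELS.get? kv.1).getD ("", 0)).2, ((PHASE_LABELS.get? kv.1).getD ("", 0)).1, kv.2)]
    else acc)]
  · exact PySem.List.foldl_append_if _ _ _ _
  · intro acc kv _
    rw [PySem.Dict.contains_eq_isSome_get?]
    cases hq : PHASE_LABELS.get? kv.1 with
    | none => simp
    | some lo =>
      by_cases hv : kv.2 = ""
      · simp [hv]
      · simp [hv]

-- B's loop builds the filtered-and-mapped phase list
lemma B_fold_eq (d : PySem.Dict String String) :
    PHASES_ORDERED.foldl (fun acc olk =>
      let value := d.getD olk.2.2 ""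
      if value ≠ "" then acc ++ [(olk.1, olk.2.1, value)] else acc) [] =
    (PHASES_ORDERED.filter (fun olk => decide (d.getD olk.2.2 "" ≠ ""))).map
      (fun olk => (olk.1, olk.2.1, d.getD olk.2.2 "")) := by
  exact PySem.List.foldl_append_ite _ _ _ _

-- sorted2 is sorted with the lexicographic pair key
lemma sorted2_eq_sorted_lex (xs : List (Int × String × String)) :
    PySem.List.sorted2 xs (fun it => it.1) (fun it => it.2.1) false =
    PySem.List.sorted xs pvKey false := by
  rw [PySem.List.sorted_eq_foldl_insertBy]
  simp only [PySem.List.sorted2]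
  have hbef : (fun (a b : Int × String × String) =>
      decide (a.1 < b.1) || (!decide (b.1 < a.1) && decide (a.2.1 < b.2.1))) =
      (fun a b => decide (pvKey a < pvKey b)) := by
    funext a b
    simp only [pvKey, Prod.Lex.lt_iff]
    rcases lt_trichotomy a.1 b.1 with h | h | h
    · simp [h, not_lt.mpr (le_of_lt h)]
    · simp [h]
    · simp [not_lt.mpr (le_of_lt h), h, ne_of_gt h]
  simp only [if_neg (by decide : ¬ (false = true))]
  rw [hbef]

-- the two filtered key lists are permutations of each other
lemma keys_perm (d : PySem.Dict String String) (hnd : d.keys.Nodup) :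
    ((PHASES_ORDERED.filter (fun olk => decide (d.getD olk.2.2 "" ≠ ""))).map (fun olk => olk.2.2)).Perm
    ((d.items.filter (fun kv => (PHASE_LABELS.get? kv.1).isSome && kv.2 != "")).map Prod.fst) := by
  refine (List.perm_ext_iff_of_nodup ?_ ?_).mpr ?_
  · exact List.Nodup.sublist (List.filter_sublist.map _)
      (by decide : (PHASES_ORDERED.map (fun olk => olk.2.2)).Nodup)
  · exact List.Nodup.sublist (List.filter_sublist.map _) hnd
  · intro x
    simp only [List.mem_map, List.mem_filter]
    constructor
    · rintro ⟨olk, ⟨holk, hv⟩, rfl⟩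
      have hv' : d.getD olk.2.2 "" ≠ "" := by simpa using hv
      have hget : d.get? olk.2.2 = some (d.getD olk.2.2 "") := by
        cases hq : d.get? olk.2.2 with
        | none => exact absurd (PySem.Dict.getD_of_get?_eq_none d "" hq) hv'
        | some w => rw [PySem.Dict.getD_of_get?_eq_some d "" hq]
      refine ⟨(olk.2.2, d.getD olk.2.2 ""), ⟨PySem.Dict.mem_items_of_get?_eq_some d hget, ?_⟩, rfl⟩
      have hpl : (PHASE_LABELS.get? olk.2.2).isSome := by
        simp only [PHASES_ORDERED, List.mem_cons, List.not_mem_nil, or_false] at holk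
        rcases holk with rfl | rfl | rfl | rfl | rfl | rfl <;> decide
      simp [hpl, hv']
    · rintro ⟨kv, ⟨hkv, hp⟩, rfl⟩
      have hsome : (PHASE_LABELS.get? kv.1).isSome ∧ kv.2 ≠ "" := by
        constructor
        · exact Bool.and_elim_left hp
        · have := Bool.and_elim_right hp
          simpa using this
      have hget : d.get? kv.1 = some kv.2 :=
        (PySem.Dict.get?_eq_some_iff_mem_items d kv.1 kv.2 hnd).mpr hkv
      have hgd : d.getD kv.1 "" = kv.2 := PySem.Dict.getD_of_get?_eq_some d "" hget
      have hmem : kv.1 ∈ PHASE_LABELS.keys := by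
        by_contra hc
        rw [← PySem.Dict.get?_eq_none_iff_not_mem_keys PHASE_LABELS kv.1] at hc
        simp [hc] at hsome
      have hk : kv.1 ∈ PHASES_ORDERED.map (fun olk => olk.2.2) := by
        have hkeys : PHASE_LABELS.keys = ["phase_understand", "phase_break", "phase_defend",
          "phase_detect", "phase_investigate", "phase_respond"] := by decide
        rw [hkeys] at hmem
        simp only [PHASES_ORDERED, List.map_cons, List.map_nil]
        simp at hmem ⊢
        tauto
      simp only [List.mem_map] at hk
      rcases hk with ⟨olk, holk, hkeq⟩
      refine ⟨olk, ⟨holk, ?_⟩, hkeq⟩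
      rw [hkeq, hgd]
      simpa using hsome.2

-- B's output is strictly increasing in the sort key
lemma B_pairwise (d : PySem.Dict String String) :
    ((PHASES_ORDERED.filter (fun olk => decide (d.getD olk.2.2 "" ≠ ""))).map
      (fun olk => (olk.1, olk.2.1, d.getD olk.2.2 ""))).Pairwise
      (fun a b => pvKey a < pvKey b) := by
  rw [List.pairwise_map]
  refine List.Pairwise.sublist List.filter_sublist ?_
  have h : PHASES_ORDERED.Pairwise
      (fun a b => (toLex (a.1, a.2.1) : Lex (Int × String)) < toLex (b.1, b.2.1)) := by
    simp only [PHASES_ORDERED, Prod.Lex.lt_iff, String.lt_iff_toList_lt]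
    decide
  exact h.imp (fun hab => hab)

lemma main_eq (metadata : List (String × String)) :
    phase_entries metadata = phase_entries_alt metadata := by
  unfold phase_entries phase_entries_alt
  have hnd : (PySem.Dict.ofList metadata).keys.Nodup := PySem.Dict.nodup_keys_ofList metadata
  set d := PySem.Dict.ofList metadata with hd
  rw [A_fold_eq d, B_fold_eq d, sorted2_eq_sorted_lex]
  apply PySem.List.sorted_eq_of_perm_of_pairwise_lt _ _ pvKey ?_ (B_pairwise d)
  have hB : (PHASES_ORDERED.filter (fun olk => decide (d.getD olk.2.2 "" ≠ ""))).map
      (fun olk => (olk.1, olk.2.1, d.getD olk.2.2 "")) =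
      ((PHASES_ORDERED.filter (fun olk => decide (d.getD olk.2.2 "" ≠ ""))).map (fun olk => olk.2.2)).map (pvEntry d) := by
    rw [List.map_map]
    apply List.map_congr_left
    intro olk holk
    have holk' : olk ∈ PHASES_ORDERED := (List.mem_filter.mp holk).1
    simp only [PHASES_ORDERED, List.mem_cons, List.not_mem_nil, or_false] at holk'
    rcases holk' with rfl | rfl | rfl | rfl | rfl | rfl <;> rfl
  have hA : (d.items.filter (fun kv => (PHASE_LABELS.get? kv.1).isSome && kv.2 != "")).map
      (fun kv => (((PHASE_LABELS.get? kv.1).getD ("", 0)).2, ((PHASE_LABELS.get? kv.1).getD ("", 0)).1, kv.2)) =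
      ((d.items.filter (fun kv => (PHASE_LABELS.get? kv.1).isSome && kv.2 != "")).map Prod.fst).map (pvEntry d) := by
    rw [List.map_map]
    apply List.map_congr_left
    intro kv hkv
    have hmem : kv ∈ d.items := (List.mem_filter.mp hkv).1
    have hs : (PHASE_LABELS.get? kv.1).isSome := by
      have := (List.mem_filter.mp hkv).2
      exact Bool.and_elim_left this
    have hgd : d.getD kv.1 "" = kv.2 := by
      have : (kv.1, kv.2) ∈ d.items := by simpa using hmem
      exact PySem.Dict.getD_of_mem_items d this hnd ""
    cases hq : PHASE_LABELS.get? kv.1 with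
    | none => rw [hq] at hs; simp at hs
    | some lo => simp [pvEntry, Function.comp, hq, hgd]
  rw [hB, hA]
  exact List.Perm.map (pvEntry d) (keys_perm d hnd)

-- ===== VERDICT (by name: the statement is the Claim_ definition above) =====
theorem phase_entries_spec : Claim_equal_phase_entries := by
  intro metadata _
  unfold Spec_phase_entries
  exact main_eq metadata
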